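-- pv_equiv track=rewrite | github.com/Amankrah/green_means_go | app/services/visualization_utils.py | generate_recommendation_priority_chart
-- ===== SOURCE A (Python) =====
-- from typing import Dict, Any, List, Tuple
--
-- def generate_recommendation_priority_chart(recommendations: List[Dict[str, Any]]) -> str:
--     """
--     Generate flowchart for recommendations by priority
--     """
--     if not recommendations:
--         return ""
--
--     high_priority = [r for r in recommendations if r.get('priority', '').lower() == 'high']
--     medium_priority = [r for r in recommendations if r.get('priority', '').lower() == 'medium']
--     low_priority = [r for r in recommendations if r.get('priority', '').lower() == 'low']
--
--     mermaid = "```mermaid\ngraph TD\n"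
--     mermaid += "    Start[Start Implementation] --> Priority{Priority Level}\n"
--
--     if high_priority:
--         mermaid += "    Priority -->|High| High[High Priority Actions]\n"
--         for i, rec in enumerate(high_priority[:3]):
--             mermaid += f"    High --> H{i}[{rec.get('title', 'Action')[:30]}]\n"
--
--     if medium_priority:
--         mermaid += "    Priority -->|Medium| Medium[Medium Priority Actions]\n"
--         for i, rec in enumerate(medium_priority[:3]):
--             mermaid += f"    Medium --> M{i}[{rec.get('title', 'Action')[:30]}]\n"
--
--     if low_priority:
--         mermaid += "    Priority -->|Low| Low[Low Priority Actions]\n"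
--
--     mermaid += "```\n"
--
--     return mermaid
-- ===== SOURCE B (Python) =====
-- def generate_recommendation_priority_chart(recommendations):
--     """One streaming pass with an accumulator: builds each section's item lines and
--     counters while scanning, instead of materialising filtered lists and then emitting."""
--     if not recommendations:
--         return ""
--
--     nh = nm = nl = 0
--     sh = sm = ""
--     for r in recommendations:
--         p = r.get('priority', '').lower()
--         if p == 'high':
--             if nh < 3:
--                 sh += "    High --> H" + str(nh) + "[" + r.get('title', 'Action')[:30] + "]\n"
--             nh += 1
--         elif p == 'medium':
--             if nm < 3:
--                 sm += "    Medium --> M" + str(nm) + "[" + r.get('title', 'Action')[:30] + "]\n"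
--             nm += 1
--         elif p == 'low':
--             nl += 1
--
--     out = "```mermaid\ngraph TD\n    Start[Start Implementation] --> Priority{Priority Level}\n"
--     if nh:
--         out += "    Priority -->|High| High[High Priority Actions]\n" + sh
--     if nm:
--         out += "    Priority -->|Medium| Medium[Medium Priority Actions]\n" + sm
--     if nl:
--         out += "    Priority -->|Low| Low[Low Priority Actions]\n"
--     return out + "```\n"
-- ===== Notes on version B (the rewrite author's own statement) =====
-- stated objective: alternative
-- what changed: A materialises three filtered lists and then runs per-priority emit loops over slices; B is a single streaming pass that never builds any intermediate list: it carries counters and the already-rendered item-line strings as its fold accumulator, then assembles the sections from that state.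
import Mathlib
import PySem

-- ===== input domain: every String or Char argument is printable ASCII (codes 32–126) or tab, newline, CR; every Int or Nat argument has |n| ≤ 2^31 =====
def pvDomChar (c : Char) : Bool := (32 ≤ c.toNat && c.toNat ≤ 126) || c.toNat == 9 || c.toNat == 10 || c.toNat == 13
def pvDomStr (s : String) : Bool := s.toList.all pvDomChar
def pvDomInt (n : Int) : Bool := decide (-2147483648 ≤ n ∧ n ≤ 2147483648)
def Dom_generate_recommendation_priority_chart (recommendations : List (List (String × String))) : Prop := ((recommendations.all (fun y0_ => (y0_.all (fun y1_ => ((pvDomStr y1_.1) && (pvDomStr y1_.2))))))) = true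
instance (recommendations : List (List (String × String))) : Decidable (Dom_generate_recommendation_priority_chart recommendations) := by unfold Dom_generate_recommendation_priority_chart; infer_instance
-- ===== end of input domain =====

-- B replaces A's three filtered lists + per-priority emit loops by one streaming pass whose
-- accumulator carries counters and the already-rendered item lines (objective: alternative, same cost).

-- shared helper: r.get(k, d) on an association list (dict lookup = first match)
def assocGetD (r : List (String × String)) (k d : String) : String :=
  match r.find? (fun p => p.1 == k) with
  | some p => p.2
  | none => d

-- shared helper: the rendered item line "    High --> H{i}[{title[:30]}]\n" (resp. Medium/M)
def hLine (n : Int) (r : List (String × String)) : String :=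
  "    High --> H" ++ PySem.Int.toStr n ++ "[" ++
    PySem.Str.slice (assocGetD r "title" "Action") none (some 30) ++ "]\n"

def mLine (n : Int) (r : List (String × String)) : String :=
  "    Medium --> M" ++ PySem.Int.toStr n ++ "[" ++
    PySem.Str.slice (assocGetD r "title" "Action") none (some 30) ++ "]\n"

-- ===== PORT A =====
-- r.get('priority', '').lower()
def aPrio (r : List (String × String)) : String :=
  PySem.Str.lower (assocGetD r "priority" "")

def generate_recommendation_priority_chart (recommendations : List (List (String × String))) : String :=
  if recommendations = [] then ""
  else
    let high_priority := recommendations.filter (fun r => aPrio r == "high")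
    let medium_priority := recommendations.filter (fun r => aPrio r == "medium")
    let low_priority := recommendations.filter (fun r => aPrio r == "low")
    let mermaid := "```mermaid\ngraph TD\n"
    let mermaid := mermaid ++ "    Start[Start Implementation] --> Priority{Priority Level}\n"
    let mermaid :=
      if high_priority ≠ [] then
        let mermaid := mermaid ++ "    Priority -->|High| High[High Priority Actions]\n"
        (PySem.List.enumerate (PySem.List.slice high_priority none (some 3)) 0).foldl
          (fun acc p => acc ++ hLine p.1 p.2) mermaid
      else mermaid
    let mermaid :=
      if medium_priority ≠ [] then
        let mermaid := mermaid ++ "    Priority -->|Medium| Medium[Medium Priority Actions]\n"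
        (PySem.List.enumerate (PySem.List.slice medium_priority none (some 3)) 0).foldl
          (fun acc p => acc ++ mLine p.1 p.2) mermaid
      else mermaid
    let mermaid :=
      if low_priority ≠ [] then mermaid ++ "    Priority -->|Low| Low[Low Priority Actions]\n"
      else mermaid
    mermaid ++ "```\n"

-- ===== PORT B =====
-- B's fold state: counters for each priority plus the already-rendered item-line strings
structure BState where
  nh : Int
  sh : String
  nm : Int
  sm : String
  nl : Int
deriving Repr, DecidableEq

-- one step of B's streaming pass
def bStep (st : BState) (r : List (String × String)) : BState :=
  let p := PySem.Str.lower (assocGetD r "priority" "")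
  if p == "high" then
    { st with sh := if st.nh < 3 then st.sh ++ hLine st.nh r else st.sh, nh := st.nh + 1 }
  else if p == "medium" then
    { st with sm := if st.nm < 3 then st.sm ++ mLine st.nm r else st.sm, nm := st.nm + 1 }
  else if p == "low" then
    { st with nl := st.nl + 1 }
  else st

def generate_recommendation_priority_chart_alt (recommendations : List (List (String × String))) : String :=
  if recommendations = [] then ""
  else
    let st := recommendations.foldl bStep ⟨0, "", 0, "", 0⟩
    let out := "```mermaid\ngraph TD\n    Start[Start Implementation] --> Priority{Priority Level}\n"
    let out := if st.nh ≠ 0 then out ++ "    Priority -->|High| High[High Priority Actions]\n" ++ st.sh else out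
    let out := if st.nm ≠ 0 then out ++ "    Priority -->|Medium| Medium[Medium Priority Actions]\n" ++ st.sm else out
    let out := if st.nl ≠ 0 then out ++ "    Priority -->|Low| Low[Low Priority Actions]\n" else out
    out ++ "```\n"

-- ===== PRECONDITION & SPEC =====
def Spec_generate_recommendation_priority_chart (recommendations : List (List (String × String))) (out : String) : Prop := out = generate_recommendation_priority_chart_alt recommendations
instance (recommendations : List (List (String × String))) (out : String) : Decidable (Spec_generate_recommendation_priority_chart recommendations out) := by unfold Spec_generate_recommendation_priority_chart; infer_instance

-- ===== CLAIM =====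
def Claim_equal_generate_recommendation_priority_chart : Prop := ∀ (recommendations : List (List (String × String))), Dom_generate_recommendation_priority_chart recommendations → Spec_generate_recommendation_priority_chart recommendations (generate_recommendation_priority_chart recommendations)

-- ===== LEMMAS AND PROOFS =====

-- the item lines a counter-driven pass renders over a (filtered) list, starting at index n
def linesF (mk : Int → List (String × String) → String) (n : Int)
    (xs : List (List (String × String))) : String :=
  match xs with
  | [] => ""
  | r :: t => (if n < 3 then mk n r else "") ++ linesF mk (n + 1) t

theorem linesF_ge3 (mk : Int → List (String × String) → String)
    (xs : List (List (String × String))) (n : Int) (h : 3 ≤ n) :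
    linesF mk n xs = "" := by
  induction xs generalizing n with
  | nil => rfl
  | cons r t ih =>
    have : ¬ n < 3 := by omega
    simp [linesF, this, ih (n + 1) (by omega)]

-- B's fold, characterised: counters = filter lengths, strings = rendered item lines
theorem bStep_foldl (xs : List (List (String × String))) (st : BState) :
    xs.foldl bStep st =
      ⟨st.nh + (xs.filter (fun r => aPrio r == "high")).length,
       st.sh ++ linesF hLine st.nh (xs.filter (fun r => aPrio r == "high")),
       st.nm + (xs.filter (fun r => aPrio r == "medium")).length,
       st.sm ++ linesF mLine st.nm (xs.filter (fun r => aPrio r == "medium")),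
       st.nl + (xs.filter (fun r => aPrio r == "low")).length⟩ := by
  induction xs generalizing st with
  | nil => simp [linesF]
  | cons r t ih =>
    simp only [List.foldl_cons, List.filter_cons, ih]
    by_cases hh : aPrio r = "high"
    · have hs : bStep st r =
          { st with sh := st.sh ++ (if st.nh < 3 then hLine st.nh r else ""), nh := st.nh + 1 } := by
        simp only [bStep, aPrio] at *
        simp [hh]
        split <;> simp
      rw [hs]
      simp [hh, linesF]
      constructor
      · omega
      · simp [String.append_assoc]
    · by_cases hm : aPrio r = "medium"
      · have hs : bStep st r =
            { st with sm := st.sm ++ (if st.nm < 3 then mLine st.nm r else ""), nm := st.nm + 1 } := by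
          simp only [bStep, aPrio] at *
          simp [hm]
          split <;> simp
        rw [hs]
        simp [hm, linesF]
        constructor
        · omega
        · simp [String.append_assoc]
      · by_cases hl : aPrio r = "low"
        · have hs : bStep st r = { st with nl := st.nl + 1 } := by
            simp only [bStep, aPrio] at *
            simp [hl]
          rw [hs]
          simp [hl]
          omega
        · have hs : bStep st r = st := by
            simp only [bStep, aPrio] at *
            simp [hh, hm, hl]
          rw [hs]
          simp [hh, hm, hl]

-- A's emit loop over enumerate(L[:3]) equals the counter-driven rendering linesF
theorem enum_foldl (mk : Int → List (String × String) → String)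
    (L : List (List (String × String))) (k : Nat) (M : String) :
    (PySem.List.enumerate (L.take (3 - k)) (k : Int)).foldl
        (fun acc p => acc ++ mk p.1 p.2) M = M ++ linesF mk (k : Int) L := by
  induction L generalizing k M with
  | nil => simp [linesF]
  | cons r t ih =>
    by_cases hk : k < 3
    · have h3 : 3 - k = (3 - (k + 1)) + 1 := by omega
      rw [h3]
      simp only [List.take_succ_cons, PySem.List.enumerate_cons, List.foldl_cons]
      have := ih (k + 1) (M ++ mk (k : Int) r)
      push_cast at this ⊢
      rw [this]
      have hlt : ((k : Int) < 3) := by exact_mod_cast hk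
      simp [linesF, hlt, String.append_assoc]
    · have h3 : 3 - k = 0 := by omega
      rw [h3]
      have hge : (3 : Int) ≤ (k : Int) := by exact_mod_cast (by omega : 3 ≤ k)
      simp [linesF_ge3 mk _ _ hge]

-- ===== VERDICT =====
theorem generate_recommendation_priority_chart_spec : Claim_equal_generate_recommendation_priority_chart := by
  intro recs _
  show _ = _
  unfold generate_recommendation_priority_chart generate_recommendation_priority_chart_alt
  by_cases hnil : recs = []
  · simp [hnil]
  · simp only [hnil, if_false, bStep_foldl]
    generalize hFH : (recs.filter (fun r => aPrio r == "high")) = FH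
    generalize hFM : (recs.filter (fun r => aPrio r == "medium")) = FM
    generalize hFL : (recs.filter (fun r => aPrio r == "low")) = FL
    have e1 : PySem.List.slice FH none (some 3) = FH.take 3 := by
      have := PySem.List.slice_to_natCast FH 3
      exact_mod_cast this
    have e2 : PySem.List.slice FM none (some 3) = FM.take 3 := by
      have := PySem.List.slice_to_natCast FM 3
      exact_mod_cast this
    have hA := enum_foldl hLine FH 0
    have hB := enum_foldl mLine FM 0
    simp only [Nat.sub_zero, Nat.cast_zero] at hA hB
    have c1 : ((0 : Int) + (FH.length : Int) ≠ 0) ↔ (FH ≠ []) := by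
      constructor
      · intro h h0; subst h0; simp at h
      · intro h; have : FH.length ≠ 0 := by simpa [List.length_eq_zero_iff] using h
        omega
    have c2 : ((0 : Int) + (FM.length : Int) ≠ 0) ↔ (FM ≠ []) := by
      constructor
      · intro h h0; subst h0; simp at h
      · intro h; have : FM.length ≠ 0 := by simpa [List.length_eq_zero_iff] using h
        omega
    have c3 : ((0 : Int) + (FL.length : Int) ≠ 0) ↔ (FL ≠ []) := by
      constructor
      · intro h h0; subst h0; simp at h
      · intro h; have : FL.length ≠ 0 := by simpa [List.length_eq_zero_iff] using h
        omega
    simp only [e1, e2, hA, hB]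
    by_cases b1 : FH = [] <;> by_cases b2 : FM = [] <;> by_cases b3 : FL = [] <;>
      simp [b1, b2, b3, String.append_assoc]
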